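-- pv_equiv track=rewrite | github.com/Rafe-Lin/Mathproject | core/code_utils/live_show_math_utils.py | _has_square_factor
-- ===== SOURCE A (Python) =====
-- def _has_square_factor(n: int) -> bool:
--     """Return True if integer n contains a perfect-square factor > 1.
--
--     A radicand is *simplifiable* when it is not in its simplest radical form,
--     e.g. 12 = 4×3 → √12 = 2√3.  Prime radicands (2, 3, 5, 7, …) are already
--     in simplest form and return False.
--     """
--     if not isinstance(n, int) or n < 4:
--         return False
--     i = 2
--     while i * i <= n:
--         if n % (i * i) == 0:
--             return True
--         i += 1
--     return False
-- ===== SOURCE B (Python) =====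
-- def _has_square_factor(n: int) -> bool:
--     """Trial-division re-implementation: shrink a working copy m by dividing
--     out each found divisor once; a divisor that still divides the quotient has
--     multiplicity >= 2, i.e. its square divides n."""
--     if not isinstance(n, int) or n < 4:
--         return False
--     m = n
--     d = 2
--     while d * d <= m:
--         if m % d == 0:
--             m //= d
--             if m % d == 0:
--                 return True
--         d += 1
--     return False
-- ===== Notes on version B (the rewrite author's own statement) =====
-- stated objective: alternative
-- what changed: B factors a shrinking working copy m by trial division, dividing each found (necessarily prime) divisor out once and reporting True when it still divides the quotient, instead of A's fixed-n scan testing i*i | n for every i up to sqrt(n).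
import Mathlib
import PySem

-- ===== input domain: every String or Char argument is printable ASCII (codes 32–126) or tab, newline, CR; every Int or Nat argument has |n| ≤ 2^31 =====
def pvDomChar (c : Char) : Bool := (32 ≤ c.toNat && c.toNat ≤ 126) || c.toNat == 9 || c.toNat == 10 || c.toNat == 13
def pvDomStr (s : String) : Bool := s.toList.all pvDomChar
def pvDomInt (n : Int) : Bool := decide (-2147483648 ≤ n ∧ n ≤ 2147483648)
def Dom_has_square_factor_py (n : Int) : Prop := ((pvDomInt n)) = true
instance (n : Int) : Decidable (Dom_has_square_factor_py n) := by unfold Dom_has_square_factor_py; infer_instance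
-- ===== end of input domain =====

-- B replaces A's fixed-n scan testing i*i ∣ n with trial division on a shrinking
-- working copy m, dividing each found divisor out once (objective: alternative).

-- used by the ports' termination proofs
theorem pv_le_of_sq_le {i n : Int} (h : i * i ≤ n) : i ≤ n := by
  rcases (by omega : 1 ≤ i ∨ i ≤ 0) with hi | hi
  · nlinarith
  · nlinarith [mul_nonneg (by omega : (0:Int) ≤ -i) (by omega : (0:Int) ≤ 1 - i)]

-- ===== PORT A =====
-- while i * i <= n: if n % (i*i) == 0: return True; i += 1
def hsfLoopA (n i : Int) : Bool :=
  if h : i * i ≤ n then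
    if PySem.Int.mod n (i * i) = 0 then true
    else hsfLoopA n (i + 1)
  else false
termination_by (n + 1 - i).toNat
decreasing_by
  have := pv_le_of_sq_le h
  omega

def has_square_factor_py (n : Int) : Bool :=
  if n < 4 then false else hsfLoopA n 2

-- ===== PORT B =====
-- while d * d <= m: if m % d == 0: m //= d; if m % d == 0: return True; d += 1
-- (the '2 ≤ d' conjunct of the guard is a totality guard only: every call has d ≥ 2)
def hsfLoopB (m d : Int) : Bool :=
  if h : 2 ≤ d ∧ d * d ≤ m then
    if PySem.Int.mod m d = 0 then
      if PySem.Int.mod (PySem.Int.floordiv m d) d = 0 then true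
      else hsfLoopB (PySem.Int.floordiv m d) (d + 1)
    else hsfLoopB m (d + 1)
  else false
termination_by (m + m + 1 - d).toNat
decreasing_by
  · have hdm : d ≤ m := le_trans (by nlinarith) h.2
    have hm : 0 < m := by omega
    rw [PySem.Int.floordiv_eq_ediv_of_pos (by omega)]
    have : m / d < m := Int.ediv_lt_of_lt_mul (by omega) (by nlinarith)
    have : 0 ≤ m / d := Int.ediv_nonneg (by omega) (by omega)
    omega
  · have hdm : d ≤ m := le_trans (by nlinarith) h.2
    omega

def has_square_factor_py_alt (n : Int) : Bool :=
  if n < 4 then false else hsfLoopB n 2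

-- ===== PRECONDITION & SPEC =====
def Spec_has_square_factor_py (n : Int) (out : Bool) : Prop := out = has_square_factor_py_alt n
instance (n : Int) (out : Bool) : Decidable (Spec_has_square_factor_py n out) := by unfold Spec_has_square_factor_py; infer_instance

-- ===== CLAIM (what is proved, stated in full; the proofs are below) =====
def Claim_equal_has_square_factor_py : Prop := ∀ (n : Int), Dom_has_square_factor_py n → Spec_has_square_factor_py n (has_square_factor_py n)

-- ===== LEMMAS AND PROOFS =====

-- A's loop returns true iff some k ≥ i has k*k ∣ n
theorem loopA_aux (n : Int) (hn : 0 < n) :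
    ∀ (N : Nat) (i : Int), (n + 1 - i).toNat ≤ N → 2 ≤ i →
      (hsfLoopA n i = true ↔ ∃ k : Int, i ≤ k ∧ k * k ∣ n) := by
  intro N
  induction N using Nat.strong_induction_on with
  | _ N ih =>
    intro i hN hi
    rw [hsfLoopA]
    split
    · rename_i hguard
      have hin : i ≤ n := pv_le_of_sq_le hguard
      split
      · rename_i hdvd
        simp only [true_iff]
        exact ⟨i, le_rfl, (PySem.Int.mod_eq_zero_iff_dvd _ _).mp hdvd⟩
      · rename_i hnd
        rw [ih (n + 1 - (i + 1)).toNat (by omega) (i + 1) le_rfl (by omega)]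
        constructor
        · rintro ⟨k, hk, hkd⟩; exact ⟨k, by omega, hkd⟩
        · rintro ⟨k, hk, hkd⟩
          refine ⟨k, ?_, hkd⟩
          by_cases hik : k = i
          · exact absurd ((PySem.Int.mod_eq_zero_iff_dvd n (k * k)).mpr hkd) (hik ▸ hnd)
          · omega
    · rename_i hguard
      simp only [Bool.false_eq_true, false_iff]
      rintro ⟨k, hk, hkd⟩
      have h1 : k * k ≤ n := Int.le_of_dvd hn hkd
      nlinarith

theorem loopA_iff (n : Int) (hn : 0 < n) (i : Int) (hi : 2 ≤ i) :
    hsfLoopA n i = true ↔ ∃ k : Int, i ≤ k ∧ k * k ∣ n :=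
  loopA_aux n hn _ i le_rfl hi

-- d is prime when it is the least divisor ≥ 2 of m
theorem minFac_prime (d m : Int) (hd : 2 ≤ d) (hdm : d ∣ m) (_hm : 0 < m)
    (hmin : ∀ k : Int, 2 ≤ k → k < d → ¬ k ∣ m) : Prime d := by
  rw [Int.prime_iff_natAbs_prime]
  have hcast : ((d.natAbs : Int)) = d := Int.natAbs_of_nonneg (by omega)
  rw [Nat.prime_def_lt]
  refine ⟨by omega, ?_⟩
  intro a ha hadvd
  by_contra hne
  have ha0 : a ≠ 0 := by rintro rfl; simp at hadvd; omega
  have ha2 : 2 ≤ a := by omega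
  have hda : (a : Int) ∣ d := by
    rw [← hcast]; exact_mod_cast hadvd
  exact hmin a (by exact_mod_cast ha2) (by omega) (hda.trans hdm)

-- a square p*p (p above the least prime factor d of m) divides m iff it divides m with d divided out once
theorem sq_dvd_quot (d m p : Int) (hprime : Prime d) (hdm : d ∣ m)
    (hnd : ¬ d ∣ m / d) (_hp : d < p) (hdvd : p * p ∣ m) : p * p ∣ m / d := by
  obtain ⟨m', rfl⟩ := hdm
  rw [Int.mul_ediv_cancel_left _ hprime.ne_zero] at hnd ⊢
  have hdp : ¬ d ∣ p := by
    intro h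
    have h2 : d * d ∣ d * m' := (mul_dvd_mul h h).trans hdvd
    exact hnd ((mul_dvd_mul_iff_left hprime.ne_zero).mp h2)
  have hcop : IsCoprime d p := (Prime.coprime_iff_not_dvd hprime).mpr hdp
  exact (hcop.symm.mul_left hcop.symm).dvd_of_dvd_mul_left hdvd

-- B's loop returns true iff some p ≥ d has p*p ∣ m, given no smaller factor remains
theorem loopB_aux : ∀ (N : Nat) (m d : Int), (m + m + 1 - d).toNat ≤ N → 0 < m → 2 ≤ d →
    (∀ k : Int, 2 ≤ k → k < d → ¬ k ∣ m) →
    (hsfLoopB m d = true ↔ ∃ p : Int, d ≤ p ∧ p * p ∣ m) := by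
  intro N
  induction N using Nat.strong_induction_on with
  | _ N ih =>
    intro m d hN hm hd hmin
    rw [hsfLoopB]
    split
    · rename_i hguard
      have hdm' : d ≤ m := le_trans (by nlinarith [hguard.2]) hguard.2
      rw [PySem.Int.floordiv_eq_ediv_of_pos (by omega : (0:Int) < d)]
      have hq : m / d < m := Int.ediv_lt_of_lt_mul (by omega) (by nlinarith)
      split
      · rename_i hdvd
        have hdvd' : d ∣ m := (PySem.Int.mod_eq_zero_iff_dvd m d).mp hdvd
        have hmeq : m / d * d = m := Int.ediv_mul_cancel hdvd'
        have hq0 : 0 < m / d := by nlinarith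
        have hprime : Prime d := minFac_prime d m hd hdvd' hm hmin
        split
        · rename_i hdvd2
          have hdd : d ∣ m / d := (PySem.Int.mod_eq_zero_iff_dvd _ d).mp hdvd2
          simp only [true_iff]
          refine ⟨d, le_rfl, ?_⟩
          obtain ⟨t, ht⟩ := hdd
          exact ⟨t, by rw [← hmeq, ht]; ring⟩
        · rename_i hnd2
          have hnd : ¬ d ∣ m / d := fun h => hnd2 ((PySem.Int.mod_eq_zero_iff_dvd _ d).mpr h)
          rw [ih (m / d + m / d + 1 - (d + 1)).toNat (by omega) (m / d) (d + 1) le_rfl hq0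
              (by omega) ?_]
          · constructor
            · rintro ⟨p, hp, hpd⟩
              refine ⟨p, by omega, hpd.trans ⟨d, hmeq.symm⟩⟩
            · rintro ⟨p, hp, hpd⟩
              have hdd2 : ¬ d * d ∣ m := by
                rintro ⟨t, ht⟩
                apply hnd
                refine ⟨t, ?_⟩
                rw [ht, mul_assoc, Int.mul_ediv_cancel_left _ (by omega : d ≠ (0:Int))]
              have hpne : p ≠ d := fun h => hdd2 (by rw [← h]; exact hpd)
              exact ⟨p, by omega, sq_dvd_quot d m p hprime hdvd' hnd (by omega) hpd⟩
          · intro k hk hkd hkdvd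
            rcases eq_or_lt_of_le (by omega : k ≤ d) with rfl | hlt
            · exact hnd hkdvd
            · exact hmin k hk hlt (hkdvd.trans ⟨d, hmeq.symm⟩)
      · rename_i hndvd
        have hnd : ¬ d ∣ m := fun h => hndvd ((PySem.Int.mod_eq_zero_iff_dvd m d).mpr h)
        rw [ih (m + m + 1 - (d + 1)).toNat (by omega) m (d + 1) le_rfl hm (by omega)
            (fun k hk hkd => by
              rcases eq_or_lt_of_le (by omega : k ≤ d) with rfl | hlt
              · exact hnd
              · exact hmin k hk hlt)]
        constructor
        · rintro ⟨p, hp, hpd⟩; exact ⟨p, by omega, hpd⟩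
        · rintro ⟨p, hp, hpd⟩
          refine ⟨p, ?_, hpd⟩
          rcases eq_or_lt_of_le hp with heq | hlt
          · exact absurd (dvd_trans (Dvd.intro p (by rw [heq])) hpd) hnd
          · omega
    · rename_i hguard
      simp only [Bool.false_eq_true, false_iff]
      rintro ⟨p, hp, hpd⟩
      have h1 : p * p ≤ m := Int.le_of_dvd hm hpd
      have : ¬ d * d ≤ m := fun h => hguard ⟨hd, h⟩
      nlinarith

theorem loopB_iff (m d : Int) (hm : 0 < m) (hd : 2 ≤ d)
    (hmin : ∀ k : Int, 2 ≤ k → k < d → ¬ k ∣ m) :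
    hsfLoopB m d = true ↔ ∃ p : Int, d ≤ p ∧ p * p ∣ m :=
  loopB_aux _ m d le_rfl hm hd hmin

-- ===== VERDICT (by name: the statement is the Claim_ definition above) =====
theorem has_square_factor_py_spec : Claim_equal_has_square_factor_py := by
  intro n _
  unfold Spec_has_square_factor_py has_square_factor_py has_square_factor_py_alt
  split
  · rfl
  · rename_i h
    have hn : 0 < n := by omega
    rw [Bool.eq_iff_iff, loopA_iff n hn 2 le_rfl,
        loopB_iff n 2 hn le_rfl (by intro k hk hk2 _; omega)]
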